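-- pv_equiv track=rewrite | github.com/yseokchoi/SejongTree2Dependency | Tree.py | doubleHead
-- ===== SOURCE A (Python) =====
-- def doubleHead(head_list):
--     head_list_dict = {b:a for a, b, rule, _, _, except_PRN in head_list if rule or except_PRN}
--     result_head = []
--     for a, b, rule, s_rule, label, except_PRN in head_list:
--         if not rule and a in head_list_dict:
--             key = head_list_dict[a]
--             while key in head_list_dict:
--                 key = head_list_dict[key]
--             result_head.append((key, b, rule, s_rule, label, except_PRN))
--             continue
--
--         else:
--             result_head.append((a, b, rule, s_rule, label, except_PRN))
--     return result_head
-- ===== SOURCE B (Python) =====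
-- def doubleHead(head_list):
--     parent = {b: a for a, b, rule, _, _, except_PRN in head_list if rule or except_PRN}
--     memo = {}
--
--     def resolve(x):
--         # follow the chain once, then path-compress: record the terminal for every
--         # node visited so later chains stop at the first memoized node
--         path = []
--         while x in parent and x not in memo:
--             path.append(x)
--             x = parent[x]
--         r = memo.get(x, x)
--         for p in path:
--             memo[p] = r
--         return r
--
--     out = []
--     for a, b, rule, s_rule, label, except_PRN in head_list:
--         if not rule and a in parent:
--             out.append((resolve(a), b, rule, s_rule, label, except_PRN))
--         else:
--             out.append((a, b, rule, s_rule, label, except_PRN))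
--     return out
-- ===== Notes on version B (the rewrite author's own statement) =====
-- stated objective: alternative
-- what changed: B replaces A's per-entry while-loop that re-chases the whole head chain by a single memoized, path-compressing resolve, so each chain node is followed at most once across the whole list (not confirmed faster in a timing run on the generated inputs).
import Mathlib
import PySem

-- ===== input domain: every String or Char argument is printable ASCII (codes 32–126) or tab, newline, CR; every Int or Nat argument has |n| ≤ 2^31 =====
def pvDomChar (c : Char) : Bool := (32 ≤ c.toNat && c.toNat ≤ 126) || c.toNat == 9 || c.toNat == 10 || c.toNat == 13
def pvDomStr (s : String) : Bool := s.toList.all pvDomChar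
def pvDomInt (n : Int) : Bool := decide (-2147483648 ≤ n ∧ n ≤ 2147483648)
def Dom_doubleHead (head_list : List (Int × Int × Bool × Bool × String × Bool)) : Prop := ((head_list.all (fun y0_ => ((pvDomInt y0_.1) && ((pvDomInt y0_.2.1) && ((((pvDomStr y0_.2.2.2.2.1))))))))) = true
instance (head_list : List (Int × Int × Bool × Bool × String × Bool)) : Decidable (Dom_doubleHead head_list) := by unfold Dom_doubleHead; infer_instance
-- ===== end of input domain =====

-- B replaces A's per-entry while-loop chain chase by a single memoized, path-compressed
-- resolution (each chain node is resolved at most once across the list).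

-- ===== PORT A =====
-- {b:a for a, b, rule, _, _, except_PRN in head_list if rule or except_PRN}  (shared by both Pythons verbatim)
def pvParent (head_list : List (Int × Int × Bool × Bool × String × Bool)) : PySem.Dict Int Int :=
  head_list.foldl (fun d t => if t.2.2.1 || t.2.2.2.2.2 then d.insert t.2.1 t.1 else d) PySem.Dict.empty

-- A's `while key in head_list_dict: key = head_list_dict[key]`; fuel keys.length+1 suffices on Pre_
def pvWhileA (d : PySem.Dict Int Int) : Nat → Int → Int
  | 0, key => key
  | fuel + 1, key => if d.contains key then pvWhileA d fuel (d.getD key 0) else key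

def pvStepA (d : PySem.Dict Int Int) (res : List (Int × Int × Bool × Bool × String × Bool))
    (t : Int × Int × Bool × Bool × String × Bool) : List (Int × Int × Bool × Bool × String × Bool) :=
  match t with
  | (a, b, rule, s_rule, label, ePRN) =>
    if !rule && d.contains a then
      res ++ [(pvWhileA d (d.keys.length + 1) (d.getD a 0), b, rule, s_rule, label, ePRN)]
    else
      res ++ [(a, b, rule, s_rule, label, ePRN)]

def doubleHead (head_list : List (Int × Int × Bool × Bool × String × Bool)) : List (Int × Int × Bool × Bool × String × Bool) :=
  let d := pvParent head_list
  head_list.foldl (pvStepA d) []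

-- ===== PORT B =====
-- B's `while x in parent and x not in memo: path.append(x); x = parent[x]`
def pvResolveLoop (d memo : PySem.Dict Int Int) : Nat → Int → List Int → Int × List Int
  | 0, x, path => (x, path)
  | fuel + 1, x, path =>
      if d.contains x && !memo.contains x then
        pvResolveLoop d memo fuel (d.getD x 0) (path ++ [x])
      else (x, path)

-- B's resolve: chase once, then write the terminal back along the path (path compression)
def pvResolve (d memo : PySem.Dict Int Int) (x : Int) : Int × PySem.Dict Int Int :=
  let xf := (pvResolveLoop d memo (d.keys.length + 1) x []).1
  let path := (pvResolveLoop d memo (d.keys.length + 1) x []).2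
  let r := memo.getD xf xf
  (r, path.foldl (fun m p => m.insert p r) memo)

def pvStepB (d : PySem.Dict Int Int)
    (st : List (Int × Int × Bool × Bool × String × Bool) × PySem.Dict Int Int)
    (t : Int × Int × Bool × Bool × String × Bool) :
    List (Int × Int × Bool × Bool × String × Bool) × PySem.Dict Int Int :=
  match t with
  | (a, b, rule, s_rule, label, ePRN) =>
    if !rule && d.contains a then
      ((st.1 ++ [((pvResolve d st.2 a).1, b, rule, s_rule, label, ePRN)]), (pvResolve d st.2 a).2)
    else
      (st.1 ++ [(a, b, rule, s_rule, label, ePRN)], st.2)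

def doubleHead_alt (head_list : List (Int × Int × Bool × Bool × String × Bool)) : List (Int × Int × Bool × Bool × String × Bool) :=
  let d := pvParent head_list
  (head_list.foldl (pvStepB d) ([], PySem.Dict.empty)).1

-- ===== PRECONDITION & SPEC =====
-- one step of a head chain: follow the dict if present, else stay put
def pvStep (d : PySem.Dict Int Int) (x : Int) : Int := if d.contains x then d.getD x 0 else x

-- Pre_ excludes exactly the inputs on which Python A does not return: a chased head chain
-- (started from a non-rule entry whose head is a dict key) that never leaves the dict's keys,
-- i.e. cycles, makes A's while loop run forever. (Leaving the keys within keys.length steps is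
-- the standard closed-form termination test for a finite functional chain, not a re-run of A.)
def Pre_doubleHead (head_list : List (Int × Int × Bool × Bool × String × Bool)) : Prop :=
  ∀ t ∈ head_list, (t.2.2.1 = false ∧ (pvParent head_list).contains t.1 = true) →
    (pvStep (pvParent head_list))^[(pvParent head_list).keys.length] t.1 ∉ (pvParent head_list).keys
instance (head_list : List (Int × Int × Bool × Bool × String × Bool)) : Decidable (Pre_doubleHead head_list) := by unfold Pre_doubleHead; infer_instance

def pvWitness_doubleHead : (List (Int × Int × Bool × Bool × String × Bool)) :=
  [(5, 1, true, false, "NP", false), (9, 2, false, false, "VP", true), (5, 3, false, false, "X", false)]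

def Spec_doubleHead (head_list : List (Int × Int × Bool × Bool × String × Bool)) (out : List (Int × Int × Bool × Bool × String × Bool)) : Prop := out = doubleHead_alt head_list
instance (head_list : List (Int × Int × Bool × Bool × String × Bool)) (out : List (Int × Int × Bool × Bool × String × Bool)) : Decidable (Spec_doubleHead head_list out) := by unfold Spec_doubleHead; infer_instance

-- ===== CLAIM (what is proved, stated in full; the proofs are below) =====
def Claim_equal_doubleHead : Prop := ∀ (head_list : List (Int × Int × Bool × Bool × String × Bool)), Dom_doubleHead head_list → Pre_doubleHead head_list → Spec_doubleHead head_list (doubleHead head_list)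

-- ===== LEMMAS AND PROOFS =====

theorem pvStep_not_mem {d : PySem.Dict Int Int} {x : Int} (h : x ∉ d.keys) : pvStep d x = x := by
  have : d.contains x = false := by
    rw [Bool.eq_false_iff]; intro hc; exact h ((PySem.Dict.contains_iff_mem_keys _ _).mp hc)
  simp [pvStep, this]

theorem pvStep_iter_not_mem {d : PySem.Dict Int Int} {x : Int} (h : x ∉ d.keys) (n : Nat) :
    (pvStep d)^[n] x = x := by
  induction n with
  | zero => rfl
  | succ n ih => rw [Function.iterate_succ_apply, pvStep_not_mem h, ih]

theorem pvStep_stab {d : PySem.Dict Int Int} {x : Int} {m n : Nat}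
    (h : (pvStep d)^[m] x ∉ d.keys) (hmn : m ≤ n) :
    (pvStep d)^[n] x = (pvStep d)^[m] x := by
  have : n = (n - m) + m := by omega
  rw [this, Function.iterate_add_apply, pvStep_iter_not_mem h]

theorem pvStep_of_contains {d : PySem.Dict Int Int} {x : Int} (h : d.contains x = true) :
    pvStep d x = d.getD x 0 := by simp [pvStep, h]

theorem pvWhileA_eq {d : PySem.Dict Int Int} : ∀ (fuel : Nat) (key : Int),
    (pvStep d)^[fuel] key ∉ d.keys → pvWhileA d fuel key = (pvStep d)^[fuel] key := by
  intro fuel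
  induction fuel with
  | zero => intro key _; rfl
  | succ fuel ih =>
    intro key h
    by_cases hc : d.contains key = true
    · rw [Function.iterate_succ_apply] at h ⊢
      simp only [pvWhileA, hc, if_true]
      rw [← pvStep_of_contains hc]
      exact ih _ h
    · have hc' : d.contains key = false := by simpa using hc
      have hk : key ∉ d.keys := fun hm => by
        rw [(PySem.Dict.contains_iff_mem_keys _ _).mpr hm] at hc'; cases hc'
      rw [pvStep_iter_not_mem hk]
      simp [pvWhileA, hc']

-- the memo invariant: every recorded value is the terminal of its key's chain
def pvInv (d memo : PySem.Dict Int Int) : Prop :=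
  ∀ k r, memo.get? k = some r → r = (pvStep d)^[d.keys.length] k

theorem pvResolveLoop_main {d memo : PySem.Dict Int Int} (hinv : pvInv d memo) :
    ∀ (fuel : Nat) (x : Int) (path : List Int), fuel ≤ d.keys.length + 1 →
    (∃ m, m < fuel ∧ (pvStep d)^[m] x ∉ d.keys) →
    memo.getD (pvResolveLoop d memo fuel x path).1 (pvResolveLoop d memo fuel x path).1
      = (pvStep d)^[d.keys.length] x
    ∧ ∀ p ∈ (pvResolveLoop d memo fuel x path).2,
        p ∈ path ∨ (pvStep d)^[d.keys.length] p = (pvStep d)^[d.keys.length] x := by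
  intro fuel
  induction fuel with
  | zero => intro x path _ ⟨m, hm, _⟩; omega
  | succ fuel ih =>
    intro x path hfuel ⟨m, hm, hout⟩
    by_cases hc : (d.contains x && !memo.contains x) = true
    · have hdx : d.contains x = true := by
        cases h1 : d.contains x <;> simp [h1] at hc ⊢
      have hxk : x ∈ d.keys := (PySem.Dict.contains_iff_mem_keys _ _).mp hdx
      have hm0 : m ≠ 0 := by intro h0; rw [h0] at hout; exact hout hxk
      have hNx : (pvStep d)^[d.keys.length] x ∉ d.keys := by
        rw [pvStep_stab hout (by omega)]; exact hout
      have hrec : (pvStep d)^[m - 1] (pvStep d x) ∉ d.keys := by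
        have h2 : (pvStep d)^[m - 1 + 1] x ∉ d.keys := by
          have hme : m - 1 + 1 = m := by omega
          rw [hme]; exact hout
        rw [Function.iterate_succ_apply] at h2; exact h2
      have hTfx : (pvStep d)^[d.keys.length] (pvStep d x) = (pvStep d)^[d.keys.length] x := by
        rw [← Function.iterate_succ_apply, Function.iterate_succ_apply', pvStep_not_mem hNx]
      simp only [pvResolveLoop, hc, if_true]
      rw [← pvStep_of_contains hdx]
      obtain ⟨h1, h2⟩ := ih (pvStep d x) (path ++ [x]) (by omega) ⟨m - 1, by omega, hrec⟩
      refine ⟨by rw [h1, hTfx], ?_⟩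
      intro p hp
      rcases h2 p hp with hp' | hp'
      · rcases List.mem_append.mp hp' with h | h
        · exact Or.inl h
        · right; simp at h; rw [h]
      · right; rw [hp', hTfx]
    · have hc' : (d.contains x && !memo.contains x) = false := by simpa using hc
      simp only [pvResolveLoop, hc', Bool.false_eq_true, if_false]
      refine ⟨?_, fun p hp => Or.inl hp⟩
      cases hmx : memo.contains x with
      | true =>
        have : (memo.get? x).isSome := by rw [← PySem.Dict.contains_eq_isSome_get?, hmx]
        obtain ⟨r, hr⟩ := Option.isSome_iff_exists.mp this
        rw [PySem.Dict.getD_of_get?_eq_some _ _ hr]; exact hinv x r hr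
      | false =>
        have hdx : d.contains x = false := by
          cases h1 : d.contains x
          · rfl
          · rw [h1, hmx] at hc'; simp at hc'
        have hxk : x ∉ d.keys := fun hm' => by
          rw [(PySem.Dict.contains_iff_mem_keys _ _).mpr hm'] at hdx; cases hdx
        rw [PySem.Dict.getD_of_not_contains _ _ hmx, pvStep_iter_not_mem hxk]

theorem pvInv_foldl_insert {d : PySem.Dict Int Int} {r : Int} :
    ∀ (ps : List Int) (memo : PySem.Dict Int Int), pvInv d memo →
    (∀ p ∈ ps, (pvStep d)^[d.keys.length] p = r) →
    pvInv d (ps.foldl (fun m p => m.insert p r) memo) := by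
  intro ps
  induction ps with
  | nil => intro memo h _; exact h
  | cons p ps ih =>
    intro memo hinv hall
    simp only [List.foldl_cons]
    refine ih _ ?_ (fun q hq => hall q (List.mem_cons_of_mem _ hq))
    intro k v hkv
    rw [PySem.Dict.get?_insert _ _ _ _] at hkv
    split_ifs at hkv with hk
    · cases hkv; rw [hk]; exact (hall p (List.mem_cons_self)).symm
    · exact hinv k v hkv

theorem pvResolve_main {d memo : PySem.Dict Int Int} {x : Int} (hinv : pvInv d memo)
    (hx : (pvStep d)^[d.keys.length] x ∉ d.keys) :
    (pvResolve d memo x).1 = (pvStep d)^[d.keys.length] x ∧ pvInv d (pvResolve d memo x).2 := by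
  obtain ⟨h1, h2⟩ := pvResolveLoop_main hinv (d.keys.length + 1) x []
    (Nat.le_refl _) ⟨d.keys.length, by omega, hx⟩
  refine ⟨h1, ?_⟩
  exact pvInv_foldl_insert _ memo hinv (fun p hp => by
    rcases h2 p hp with h | h
    · cases h
    · rw [h, ← h1])

theorem pvFold_eq {d : PySem.Dict Int Int} :
    ∀ (rest : List (Int × Int × Bool × Bool × String × Bool))
      (acc : List (Int × Int × Bool × Bool × String × Bool)) (memo : PySem.Dict Int Int),
    pvInv d memo →
    (∀ t ∈ rest, (t.2.2.1 = false ∧ d.contains t.1 = true) →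
      (pvStep d)^[d.keys.length] t.1 ∉ d.keys) →
    rest.foldl (pvStepA d) acc = (rest.foldl (pvStepB d) (acc, memo)).1 := by
  intro rest
  induction rest with
  | nil => intro acc memo _ _; rfl
  | cons t rest ih =>
    intro acc memo hinv hpre
    obtain ⟨a, b, rule, s_rule, label, ePRN⟩ := t
    by_cases hc : (!rule && d.contains a) = true
    · have hrule : rule = false := by
        cases rule
        · rfl
        · simp at hc
      have hda : d.contains a = true := by
        cases h1 : d.contains a
        · rw [h1, hrule] at hc; simp at hc
        · rfl
      have ha : (pvStep d)^[d.keys.length] a ∉ d.keys :=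
        hpre (a, b, rule, s_rule, label, ePRN) List.mem_cons_self ⟨hrule, hda⟩
      obtain ⟨hres, hinv'⟩ := pvResolve_main hinv ha
      have hA : pvWhileA d (d.keys.length + 1) (d.getD a 0) = (pvStep d)^[d.keys.length] a := by
        have hN1 : (pvStep d)^[d.keys.length + 1] (d.getD a 0) ∉ d.keys := by
          rw [← pvStep_of_contains hda, ← Function.iterate_succ_apply,
            pvStep_stab ha (by omega)]
          exact ha
        rw [pvWhileA_eq _ _ hN1, ← pvStep_of_contains hda, ← Function.iterate_succ_apply,
          pvStep_stab ha (by omega)]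
      simp only [List.foldl_cons, pvStepA, pvStepB, hc, if_true]
      rw [hA, ← hres]
      exact ih _ _ hinv' (fun u hu => hpre u (List.mem_cons_of_mem _ hu))
    · have hc' : (!rule && d.contains a) = false := by simpa using hc
      simp only [List.foldl_cons, pvStepA, pvStepB, hc']
      exact ih _ _ hinv (fun u hu => hpre u (List.mem_cons_of_mem _ hu))

-- ===== VERDICT (by name: the statement is the Claim_ definition above) =====
theorem doubleHead_spec : Claim_equal_doubleHead := by
  intro head_list _ hpre
  unfold Spec_doubleHead doubleHead doubleHead_alt
  exact pvFold_eq head_list [] PySem.Dict.empty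
    (fun k r h => by simp [PySem.Dict.get?_empty] at h) hpre
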